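-- pv_equiv track=rewrite | github.com/Anton-Tarazi/Algorithms-Illuminated | chapter3.py | equal_index
-- ===== SOURCE A (Python) =====
-- def equal_index(array, offset=0):
--     """Algorithms Illuminated problem 3.4. Returns True/ False if sorted integer array has an element
--     that is equal to its search_index. O(log n) runtime"""
--     if len(array) == 0:
--         return False
--
--     index_to_check = len(array) // 2
--
--     if array[index_to_check] == index_to_check + offset:
--         return True
--     elif array[index_to_check] < index_to_check + offset:
--         offset += index_to_check + 1
--         return equal_index(array[index_to_check + 1:], offset)
--     else:
--         return equal_index(array[:index_to_check], offset)
-- ===== SOURCE B (Python) =====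
-- def equal_index(array, offset=0):
--     """Iterative binary search over lo/hi index bounds; no slicing, O(log n) with O(1) extra space."""
--     lo, hi = 0, len(array)
--     while lo < hi:
--         m = lo + (hi - lo) // 2
--         v = array[m]
--         if v == m + offset:
--             return True
--         if v < m + offset:
--             lo = m + 1
--         else:
--             hi = m
--     return False
-- ===== Notes on version B (the rewrite author's own statement) =====
-- stated objective: alternative
-- what changed: Replaced the slice-and-recurse binary search (each recursive call copies a slice of the array) with an iterative lo/hi-bounds loop that probes the same midpoints without any copying, O(1) extra space.
import Mathlib
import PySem

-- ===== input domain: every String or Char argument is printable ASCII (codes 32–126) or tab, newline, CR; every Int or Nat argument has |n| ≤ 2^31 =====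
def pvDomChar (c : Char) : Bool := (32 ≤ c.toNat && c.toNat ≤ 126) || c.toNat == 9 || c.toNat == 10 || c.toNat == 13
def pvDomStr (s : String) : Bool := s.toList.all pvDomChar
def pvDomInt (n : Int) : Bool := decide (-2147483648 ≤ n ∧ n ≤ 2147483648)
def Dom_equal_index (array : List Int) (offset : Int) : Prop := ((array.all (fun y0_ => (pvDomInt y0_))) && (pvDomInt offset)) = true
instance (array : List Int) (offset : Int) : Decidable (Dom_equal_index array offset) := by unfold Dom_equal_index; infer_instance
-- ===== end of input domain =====

-- B replaces A's slice-and-recurse binary search by an iterative lo/hi bounds loop that probes the same midpoints without slice copies.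

-- ===== PORT A =====
-- A's recursion on ever-shorter slices, written with a structural fuel guard (fuel = initial
-- length bounds the recursion depth, the 0 case is unreachable when fuel ≥ array.length);
-- array[i] with 0 ≤ i < len is exact as getD (the default is unreachable);
-- array[i+1:] and array[:i] with nonneg in-range i are exactly List.drop / List.take.
def equalIndexRec (fuel : Nat) (array : List Int) (offset : Int) : Bool :=
  match fuel with
  | 0 => false
  | fuel + 1 =>
    if array.length = 0 then false
    else
      let i := array.length / 2
      if array.getD i 0 = (i : Int) + offset then true
      else if array.getD i 0 < (i : Int) + offset then
        equalIndexRec fuel (array.drop (i + 1)) (offset + ((i : Int) + 1))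
      else
        equalIndexRec fuel (array.take i) offset

def equal_index (array : List Int) (offset : Int) : Bool :=
  equalIndexRec array.length array offset

-- ===== PORT B =====
-- B's while-loop over lo/hi index bounds, written with the same structural fuel guard
-- (fuel = initial length bounds the iteration count, the 0 case is unreachable).
def equalIndexLoop (array : List Int) (offset : Int) (fuel lo hi : Nat) : Bool :=
  match fuel with
  | 0 => false
  | fuel + 1 =>
    if lo < hi then
      let m := lo + (hi - lo) / 2
      let v := array.getD m 0
      if v = (m : Int) + offset then true
      else if v < (m : Int) + offset then equalIndexLoop array offset fuel (m + 1) hi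
      else equalIndexLoop array offset fuel lo m
    else false

def equal_index_alt (array : List Int) (offset : Int) : Bool :=
  equalIndexLoop array offset array.length 0 array.length

-- ===== PRECONDITION & SPEC =====
def Spec_equal_index (array : List Int) (offset : Int) (out : Bool) : Prop := out = equal_index_alt array offset
instance (array : List Int) (offset : Int) (out : Bool) : Decidable (Spec_equal_index array offset out) := by unfold Spec_equal_index; infer_instance

-- ===== CLAIM (what is proved, stated in full; the proofs are below) =====
def Claim_equal_equal_index : Prop := ∀ (array : List Int) (offset : Int), Dom_equal_index array offset → Spec_equal_index array offset (equal_index array offset)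

-- ===== LEMMAS AND PROOFS =====

lemma getD_drop_take (array : List Int) (lo hi k : Nat) (hk : k < hi - lo) :
    ((array.drop lo).take (hi - lo)).getD k 0 = array.getD (lo + k) 0 := by
  rw [List.getD_eq_getElem?_getD, List.getD_eq_getElem?_getD,
      List.getElem?_take_of_lt hk, List.getElem?_drop]

lemma equal_index_loop_eq (array : List Int) :
    ∀ n fa fb lo hi offset, hi - lo = n → hi ≤ array.length →
      hi - lo ≤ fa → hi - lo ≤ fb →
      equalIndexRec fa ((array.drop lo).take (hi - lo)) (offset + (lo : Int)) =
        equalIndexLoop array offset fb lo hi := by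
  intro n
  induction n using Nat.strong_induction_on with
  | _ n ih =>
    intro fa fb lo hi offset hn hhi hfa hfb
    have hlen : ((array.drop lo).take (hi - lo)).length = hi - lo := by
      simp [List.length_take, List.length_drop]; omega
    by_cases hlt : lo < hi
    · obtain ⟨fa', rfl⟩ : ∃ fa', fa = fa' + 1 := ⟨fa - 1, by omega⟩
      obtain ⟨fb', rfl⟩ : ∃ fb', fb = fb' + 1 := ⟨fb - 1, by omega⟩
      rw [equalIndexRec, equalIndexLoop]
      have hne : ¬ ((array.drop lo).take (hi - lo)).length = 0 := by omega
      rw [if_neg hne, if_pos hlt]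
      simp only [hlen]
      set i := (hi - lo) / 2 with hi_def
      have hik : i < hi - lo := Nat.div_lt_self (by omega) (by omega)
      have hg : ((array.drop lo).take (hi - lo)).getD i 0 = array.getD (lo + i) 0 :=
        getD_drop_take array lo hi i hik
      rw [hg]
      have hcast : (i : Int) + (offset + (lo : Int)) = ((lo + i : Nat) : Int) + offset := by
        push_cast; ring
      rw [hcast]
      split_ifs with h1 h2
      · rfl
      · -- right half
        have hsub : ((array.drop lo).take (hi - lo)).drop (i + 1) =
            (array.drop (lo + i + 1)).take (hi - (lo + i + 1)) := by
          rw [List.drop_take, List.drop_drop]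
          congr 1
          omega
        rw [hsub]
        have hrec := ih (hi - (lo + i + 1)) (by omega) fa' fb' (lo + i + 1) hi offset rfl hhi
          (by omega) (by omega)
        rw [← hrec]
        congr 1
        push_cast; ring
      · -- left half
        have hsub : ((array.drop lo).take (hi - lo)).take i =
            (array.drop lo).take (lo + i - lo) := by
          rw [List.take_take]
          congr 1
          omega
        rw [hsub]
        exact ih (lo + i - lo) (by omega) fa' fb' lo (lo + i) offset rfl (by omega)
          (by omega) (by omega)
    · have hl0 : ((array.drop lo).take (hi - lo)).length = 0 := by omega
      have hA : equalIndexRec fa ((array.drop lo).take (hi - lo)) (offset + (lo : Int)) = false := by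
        cases fa with
        | zero => rfl
        | succ fa => rw [equalIndexRec, if_pos hl0]
      have hB : equalIndexLoop array offset fb lo hi = false := by
        cases fb with
        | zero => rfl
        | succ fb => rw [equalIndexLoop, if_neg hlt]
      rw [hA, hB]

-- ===== VERDICT (by name: the statement is the Claim_ definition above) =====
theorem equal_index_spec : Claim_equal_equal_index := by
  intro array offset _
  unfold Spec_equal_index equal_index_alt equal_index
  have := equal_index_loop_eq array array.length array.length array.length 0 array.length
    offset rfl (le_refl _) (by omega) (by omega)
  simpa using this
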